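-- pv_equiv track=rewrite | github.com/Zviad-Kvara/My_Python_Trainings | tasks/twisted_sum.py | compute_sum
-- ===== SOURCE A (Python) =====
-- def compute_sum(n):
--     result = 0
--     for i in range(n + 1):
--         if i > 9:
--             digits = [int(d) for d in str(i)]
--             result += sum(digits)
--         if i <= 9:
--             result += i
--
--     return result
-- ===== SOURCE B (Python) =====
-- def _ds(n):
--     s = 0
--     while n > 0:
--         s += n % 10
--         n //= 10
--     return s
--
--
-- def compute_sum(n):
--     # digit-DP: counts the digit contributions of whole decimal blocks at once,
--     # recursing on the leading digits instead of visiting every number.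
--     if n <= 0:
--         return 0
--     q, r = divmod(n, 10)
--     return 10 * compute_sum(q - 1) + 45 * q + (r + 1) * _ds(q) + r * (r + 1) // 2
-- ===== Notes on version B (the rewrite author's own statement) =====
-- stated objective: faster
-- what changed: replaced the per-number loop that stringifies every i and sums its digit characters by a digit-DP recurrence on n//10 that counts digit contributions per block, O(log n) arithmetic instead of O(n) string work
import Mathlib
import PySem

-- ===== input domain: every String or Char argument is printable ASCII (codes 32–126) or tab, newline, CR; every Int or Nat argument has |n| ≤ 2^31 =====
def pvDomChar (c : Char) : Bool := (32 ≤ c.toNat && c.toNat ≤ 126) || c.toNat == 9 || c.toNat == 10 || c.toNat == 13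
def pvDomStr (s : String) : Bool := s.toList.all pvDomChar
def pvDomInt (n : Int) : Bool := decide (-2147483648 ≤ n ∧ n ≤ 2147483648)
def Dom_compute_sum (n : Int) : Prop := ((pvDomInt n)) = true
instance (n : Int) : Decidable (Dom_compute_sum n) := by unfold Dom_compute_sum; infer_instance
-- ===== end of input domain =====

-- B replaces A's per-number stringify-and-sum-the-digits loop by a digit-DP block recurrence.

-- ===== PORT A =====
-- int(d) for a single char d of str(i); the default 0 is never reached: for i > 9
-- every char of str(i) is a decimal digit, on which int() returns normally.
def pyIntOfDigitChar (d : Char) : Int := (PySem.Int.ofStr? (String.ofList [d])).getD 0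

def compute_sum (n : Int) : Int :=
  (PySem.List.pyRange 0 (n + 1) 1).foldl (fun result i =>
    let result := if 9 < i then
        result + ((PySem.Int.toStr i).toList.map pyIntOfDigitChar).sum
      else result
    if i ≤ 9 then result + i else result) 0

-- ===== PORT B =====
-- Source B's _ds:  while n > 0: s += n % 10; n //= 10
def dsB (n : Int) : Int :=
  if h : 0 < n then PySem.Int.mod n 10 + dsB (PySem.Int.floordiv n 10) else 0
termination_by n.toNat
decreasing_by
  rw [PySem.Int.floordiv_eq_ediv_of_pos (by norm_num)]
  omega

def compute_sum_alt (n : Int) : Int :=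
  if h : n ≤ 0 then 0
  else
    let q := PySem.Int.floordiv n 10
    let r := PySem.Int.mod n 10
    10 * compute_sum_alt (q - 1) + 45 * q + (r + 1) * dsB q
      + PySem.Int.floordiv (r * (r + 1)) 2
termination_by n.toNat
decreasing_by
  rw [PySem.Int.floordiv_eq_ediv_of_pos (by norm_num)]
  omega

-- ===== PRECONDITION & SPEC =====
def Spec_compute_sum (n : Int) (out : Int) : Prop := out = compute_sum_alt n
instance (n : Int) (out : Int) : Decidable (Spec_compute_sum n out) := by unfold Spec_compute_sum; infer_instance

-- ===== CLAIM (what is proved, stated in full; the proofs are below) =====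
def Claim_equal_compute_sum : Prop := ∀ (n : Int), Dom_compute_sum n → Spec_compute_sum n (compute_sum n)

-- ===== LEMMAS AND PROOFS =====

-- sum of dsB over 0..n: the common reference value of both ports
def S (n : Int) : Int := ((PySem.List.pyRange 0 (n + 1) 1).map dsB).sum

theorem dsB_zero : dsB 0 = 0 := by rw [dsB]; simp

theorem dsB_small (i : Int) (h0 : 0 ≤ i) (h9 : i ≤ 9) : dsB i = i := by
  rw [dsB]
  rcases lt_or_eq_of_le h0 with h | h
  · rw [dif_pos h, PySem.Int.mod_eq_emod_of_pos (by norm_num),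
      PySem.Int.floordiv_eq_ediv_of_pos (by norm_num)]
    have : i / 10 = 0 := by omega
    rw [this, dsB_zero]
    omega
  · rw [dif_neg (by omega)]; omega

theorem dsB_tenq (q b : Int) (hq : 0 ≤ q) (hb0 : 0 ≤ b) (hb9 : b < 10) :
    dsB (10 * q + b) = dsB q + b := by
  rcases lt_or_eq_of_le (by omega : (0:Int) ≤ 10 * q + b) with h | h
  · rw [dsB, dif_pos h, PySem.Int.mod_eq_emod_of_pos (by norm_num),
      PySem.Int.floordiv_eq_ediv_of_pos (by norm_num)]
    have h1 : (10 * q + b) % 10 = b := by omega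
    have h2 : (10 * q + b) / 10 = q := by omega
    rw [h1, h2]; ring
  · have hq0 : q = 0 := by omega
    have hb : b = 0 := by omega
    simp [hq0, hb, dsB_zero]

theorem digitChar_val (r : Nat) (h : r < 10) : pyIntOfDigitChar (Nat.digitChar r) = r := by
  interval_cases r <;> decide

theorem toDigitsCore_sum (f : Nat) : ∀ (m : Nat) (acc : List Char), m < 10 ^ f →
    ((Nat.toDigitsCore 10 f m acc).map pyIntOfDigitChar).sum
      = dsB m + (acc.map pyIntOfDigitChar).sum := by
  induction f with
  | zero =>
    intro m acc hm
    have : m = 0 := by omega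
    simp [this, Nat.toDigitsCore, dsB_zero]
  | succ f ih =>
    intro m acc hm
    rw [Nat.toDigitsCore]
    by_cases h : m / 10 = 0
    · have hm10 : m < 10 := by omega
      rw [if_pos h]
      have hd : dsB (m : Int) = m := dsB_small _ (by omega) (by omega)
      simp [hd, digitChar_val (m % 10) (by omega)]
      omega
    · rw [if_neg h]
      have hlt : m / 10 < 10 ^ f := by
        rw [Nat.div_lt_iff_lt_mul (by norm_num : 0 < 10)]
        calc m < 10 ^ (f + 1) := hm
        _ = 10 ^ f * 10 := by ring
      rw [ih (m / 10) _ hlt]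
      have hstep : dsB (m : Int) = (m % 10 : Nat) + dsB ((m / 10 : Nat) : Int) := by
        rw [dsB, dif_pos (by exact_mod_cast Nat.pos_of_ne_zero (by omega) : (0:Int) < m)]
        simp
      rw [hstep]
      simp [digitChar_val (m % 10) (by omega)]
      ring

theorem toStr_digit_sum (i : Int) (h : 0 ≤ i) :
    ((PySem.Int.toStr i).toList.map pyIntOfDigitChar).sum = dsB i := by
  rw [PySem.Int.toList_toStr, PySem.Int.toChars, if_neg (by omega)]
  have hfuel : i.toNat < 10 ^ (i.toNat + 1) := by
    calc i.toNat < 10 ^ i.toNat := Nat.lt_pow_self (by norm_num)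
    _ ≤ 10 ^ (i.toNat + 1) := Nat.pow_le_pow_right (by norm_num) (by omega)
  rw [Nat.toDigits, toDigitsCore_sum _ _ _ hfuel]
  simp [Int.toNat_of_nonneg h]

theorem compute_sum_eq_S (n : Int) : compute_sum n = S n := by
  rw [compute_sum, S]
  refine (PySem.List.foldl_congr_mem _ _ (fun result i => result + dsB i) _ ?_).trans ?_
  · intro acc x hx
    have hx0 : 0 ≤ x := (PySem.List.mem_pyRange_one.mp hx).1
    by_cases h9 : x ≤ 9
    · simp only [if_neg (by omega : ¬ 9 < x), if_pos h9]
      rw [dsB_small x hx0 h9]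
    · simp only [if_pos (by omega : 9 < x), if_neg h9]
      rw [toStr_digit_sum x hx0]
  · rw [PySem.List.foldl_add]
    simp

theorem tri_double (r : Int) :
    PySem.Int.floordiv (r * (r + 1)) 2 * 2 = r * (r + 1) := by
  rw [PySem.Int.floordiv_eq_ediv_of_pos (by norm_num)]
  exact Int.ediv_mul_cancel (Int.even_mul_succ_self r).two_dvd

theorem block_sum (q : Int) (hq : 0 ≤ q) :
    ((PySem.List.pyRange 0 (10 * q) 1).map dsB).sum
      = 10 * ((PySem.List.pyRange 0 q 1).map dsB).sum + 45 * q := by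
  induction q, hq using Int.le_induction with
  | base => simp [PySem.List.pyRange_one_eq_nil]
  | succ q hq0 ih =>
    rw [PySem.List.pyRange_one_append 0 (10 * q) (10 * (q + 1)) (by omega) (by omega),
      PySem.List.pyRange_one_succ_right (by omega : (0:Int) ≤ q)]
    have hten : PySem.List.pyRange (10 * q) (10 * (q + 1)) 1
        = [10*q, 10*q+1, 10*q+2, 10*q+3, 10*q+4, 10*q+5, 10*q+6, 10*q+7, 10*q+8, 10*q+9] := by
      rw [show 10 * (q + 1) = 10 * q + 10 by ring, PySem.List.pyRange_one]
      rw [show ((10 * q + 10 - 10 * q).toNat) = 10 by omega]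
      simp [List.range_succ]
    rw [hten]
    simp only [List.map_append, List.sum_append, List.map_cons, List.map_nil, List.sum_cons,
      List.sum_nil]
    have hb : ∀ b : Int, 0 ≤ b → b < 10 → dsB (10 * q + b) = dsB q + b :=
      fun b h1 h2 => dsB_tenq q b hq0 h1 h2
    have h0 : dsB (10 * q) = dsB q := by simpa using hb 0 le_rfl (by norm_num)
    rw [h0, hb 1 (by norm_num) (by norm_num), hb 2 (by norm_num) (by norm_num),
      hb 3 (by norm_num) (by norm_num), hb 4 (by norm_num) (by norm_num),
      hb 5 (by norm_num) (by norm_num), hb 6 (by norm_num) (by norm_num),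
      hb 7 (by norm_num) (by norm_num), hb 8 (by norm_num) (by norm_num),
      hb 9 (by norm_num) (by norm_num), ih]
    ring

theorem tail_sum (q : Int) (hq : 0 ≤ q) : ∀ r : Int, 0 ≤ r → r < 10 →
    ((PySem.List.pyRange (10 * q) (10 * q + r + 1) 1).map dsB).sum
      = (r + 1) * dsB q + PySem.Int.floordiv (r * (r + 1)) 2 := by
  intro r hr
  induction r, hr using Int.le_induction with
  | base =>
    intro _
    rw [show 10 * q + 0 + 1 = 10 * q + 1 by ring, PySem.List.pyRange_one_singleton]
    have h0 : dsB (10 * q) = dsB q := by simpa using dsB_tenq q 0 hq le_rfl (by norm_num)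
    simp [h0]
  | succ r hr0 ih =>
    intro hlt
    have ih' := ih (by omega)
    rw [show 10 * q + (r + 1) + 1 = (10 * q + r + 1) + 1 by ring,
      PySem.List.pyRange_one_succ_right (by omega : 10 * q ≤ 10 * q + r + 1)]
    simp only [List.map_append, List.sum_append, List.map_cons, List.map_nil, List.sum_cons,
      List.sum_nil, ih']
    rw [show 10 * q + r + 1 = 10 * q + (r + 1) by ring, dsB_tenq q (r + 1) hq (by omega) hlt]
    have hx := tri_double r
    have hy := tri_double (r + 1)
    have h2 : PySem.Int.floordiv ((r + 1) * (r + 1 + 1)) 2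
        = PySem.Int.floordiv (r * (r + 1)) 2 + (r + 1) := by
      have : PySem.Int.floordiv ((r + 1) * (r + 1 + 1)) 2 * 2
          = (PySem.Int.floordiv (r * (r + 1)) 2 + (r + 1)) * 2 := by
        linear_combination hy - hx
      omega
    rw [h2]
    ring

theorem S_nonpos (n : Int) (h : n ≤ 0) : S n = 0 := by
  rcases lt_or_eq_of_le h with h' | h'
  · rw [S, PySem.List.pyRange_one_eq_nil (by omega)]; simp
  · subst h'
    rw [S, show (0:Int) + 1 = 0 + 1 by ring, PySem.List.pyRange_one_singleton]
    simp [dsB_zero]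

theorem alt_eq_S : ∀ (k : Nat) (n : Int), n.toNat ≤ k → compute_sum_alt n = S n := by
  intro k
  induction k with
  | zero =>
    intro n hn
    have h : n ≤ 0 := by omega
    rw [compute_sum_alt, dif_pos h, S_nonpos n h]
  | succ k ih =>
    intro n hn
    by_cases h : n ≤ 0
    · rw [compute_sum_alt, dif_pos h, S_nonpos n h]
    · rw [compute_sum_alt, dif_neg h]
      simp only [PySem.Int.floordiv_eq_ediv_of_pos (a := n) (by norm_num : (0:Int) < 10),
        PySem.Int.mod_eq_emod_of_pos (a := n) (by norm_num : (0:Int) < 10)]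
      set q := n / 10 with hqdef
      set r := n % 10 with hrdef
      have hq : 0 ≤ q := by omega
      have hr0 : 0 ≤ r := by omega
      have hr9 : r < 10 := by omega
      have hnqr : n = 10 * q + r := by omega
      have hih : compute_sum_alt (q - 1) = S (q - 1) := ih (q - 1) (by omega)
      have hSq : S (q - 1) = ((PySem.List.pyRange 0 q 1).map dsB).sum := by
        rw [S, show q - 1 + 1 = q by ring]
      rw [hih, hSq, S,
        PySem.List.pyRange_one_append 0 (10 * q) (n + 1) (by omega) (by omega),
        show n + 1 = 10 * q + r + 1 by omega]
      simp only [List.map_append, List.sum_append]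
      rw [block_sum q hq, tail_sum q hq r hr0 hr9]
      ring

-- ===== VERDICT (by name: the statement is the Claim_ definition above) =====
theorem compute_sum_spec : Claim_equal_compute_sum := by
  intro n _
  show compute_sum n = compute_sum_alt n
  rw [compute_sum_eq_S, alt_eq_S n.toNat n le_rfl]
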